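-- pv_equiv track=rewrite | github.com/FakeYou/advent-of-code | 2015/day-09/solve.py | getGraphDistances
-- ===== SOURCE A (Python) =====
-- def getPermutations(array):
--     results = []
--
--     # recursive method
--     def permute(array, memo=[]):
--         for i in range(0, len(array)):
--             current = array[i:i+1]
--             array.pop(i)
--
--             if len(array) is 0:
--                 results.append(current + memo)
--
--             permute(array[:], current + memo)
--
--             array.insert(i, current[0])
--
--         return results
--
--     return permute(array)
--
-- def getGraphDistances(graph):
--     distances = []
--     permutations = getPermutations(list(graph))
--
--     # loop through every permutation and calculate the total distance
--     for permutation in permutations: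
--         distance = 0
--
--         # add the distance between every person
--         for i in range(0, len(permutation) - 1):
--             (start, end) = permutation[i:i + 2]
--
--             distance += graph[start][end]
--
--         distances.append(distance)
--
--     return distances
-- ===== SOURCE B (Python) =====
-- def getGraphDistances(graph):
--     nodes = list(graph)
--
--     def perms(pool):
--         # permutations in the same order A emits them: pick the LAST element first
--         if not pool:
--             return [[]]
--         return [rest + [pool[i]]
--                 for i in range(len(pool))
--                 for rest in perms(pool[:i] + pool[i + 1:])]
--
--     if not nodes:
--         return []
--     return [sum(graph[a][b] for a, b in zip(p, p[1:])) for p in perms(nodes)]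
-- ===== Notes on version B (the rewrite author's own statement) =====
-- stated objective: simpler
-- what changed: A's in-place pop/insert recursive permutation generator with a shared results list and memo accumulator is replaced by a short pure recursion that emits each permutation directly in A's order (rest + [pool[i]]), and the per-permutation indexed slice-and-accumulate distance loop by a sum over zipped adjacent pairs.
-- outside the precondition, e.g. on getGraphDistances({'a': {}, 'b': {}}): A raises KeyError, B raises KeyError
import Mathlib
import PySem

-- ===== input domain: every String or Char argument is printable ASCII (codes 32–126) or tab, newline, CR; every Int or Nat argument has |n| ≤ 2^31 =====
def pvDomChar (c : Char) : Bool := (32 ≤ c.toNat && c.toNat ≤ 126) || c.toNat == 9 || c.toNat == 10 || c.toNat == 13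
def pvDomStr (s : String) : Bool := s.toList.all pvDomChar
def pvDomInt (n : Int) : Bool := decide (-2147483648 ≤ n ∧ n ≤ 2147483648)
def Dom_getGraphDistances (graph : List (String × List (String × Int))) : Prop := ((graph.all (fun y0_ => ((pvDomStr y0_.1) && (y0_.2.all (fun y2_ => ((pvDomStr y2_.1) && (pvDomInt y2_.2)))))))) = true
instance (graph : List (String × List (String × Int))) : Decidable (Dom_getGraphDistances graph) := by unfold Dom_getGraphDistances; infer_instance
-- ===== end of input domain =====

-- B replaces A's in-place pop/insert permutation generator (shared results list, memo
-- accumulator) with a short pure recursion that emits each permutation directly in A's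
-- order, and sums edge weights over zipped adjacent pairs (objective: simpler; same cost).

-- ===== PORT A =====
-- edge weight graph[start][end] (dict-of-dicts lookup; total form — both keys exist under Pre_)
def pvWeight (graph : List (String × List (String × Int))) (s e : String) : Int :=
  (PySem.Dict.mk ((PySem.Dict.mk graph).getD s [])).getD e 0

-- A's nested `permute`: the for-loop over i becomes a foldl over range(len(array)) with the
-- shared `results` list threaded through.  `current = array[i:i+1]` is ported as
-- `[array.getD i ""]` (exact: 0 ≤ i < len(array)); `array.pop(i)` / recursion on `array[:]` /
-- `array.insert(i, …)` as recursion on `array.eraseIdx i` (exact: the insert restores the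
-- popped list unchanged).  `fuel` is only a totality guard: Python's recursion depth is
-- exactly len(array), and every call below keeps len(array) ≤ fuel.
def permuteLoop (fuel : Nat) (array memo : List String) (results : List (List String)) :
    List (List String) :=
  match fuel with
  | 0 => results
  | fuel + 1 =>
    (List.range array.length).foldl
      (fun res i =>
        let current := [array.getD i ""]
        let rest := array.eraseIdx i
        let res := if rest.length = 0 then res ++ [current ++ memo] else res
        permuteLoop fuel rest (current ++ memo) res)
      results

def getGraphDistances (graph : List (String × List (String × Int))) : List Int :=
  let array := graph.map Prod.fst
  let permutations := permuteLoop array.length array [] []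
  -- `(start, end) = permutation[i:i+2]` ported as the elements perm[i], perm[i+1]
  -- (exact: 0 ≤ i < len(perm) - 1)
  permutations.foldl
    (fun distances permutation =>
      distances ++
        [(PySem.List.pyRange 0 ((permutation.length : Int) - 1) 1).foldl
          (fun distance i =>
            distance +
              pvWeight graph (PySem.List.pyGetD permutation i "")
                (PySem.List.pyGetD permutation (i + 1) ""))
          0])
    []

-- ===== PORT B =====
-- B's pure recursive generator: rest + [pool[i]] for each i, rest a permutation of pool minus i
def permsB (pool : List String) : List (List String) :=
  if _hp : pool.isEmpty then [[]]
  else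
    (List.range pool.length).attach.flatMap
      (fun i =>
        (permsB (pool.eraseIdx i.1)).map (fun rest => rest ++ [pool.getD i.1 ""]))
termination_by pool.length
decreasing_by
  exact List.length_eraseIdx_of_lt (List.mem_range.mp i.2) ▸
    Nat.sub_lt (Nat.lt_of_le_of_lt (Nat.zero_le i.1) (List.mem_range.mp i.2)) Nat.one_pos

def getGraphDistances_alt (graph : List (String × List (String × Int))) : List Int :=
  let nodes := graph.map Prod.fst
  if nodes.isEmpty then []
  else
    (permsB nodes).map
      (fun p => ((p.zip (p.drop 1)).map (fun ab => pvWeight graph ab.1 ab.2)).sum)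

-- ===== PRECONDITION & SPEC =====
-- Pre_ excludes the inputs on which A raises KeyError (some ordered pair of distinct nodes
-- with no edge recorded between them), and association lists with duplicate keys (outer or
-- inner), which do not represent a Python dict.
def Pre_getGraphDistances (graph : List (String × List (String × Int))) : Prop :=
  (graph.map Prod.fst).Nodup ∧
    ∀ p ∈ graph, (p.2.map Prod.fst).Nodup ∧
      ∀ q ∈ graph, p.1 ≠ q.1 → (PySem.Dict.mk p.2).contains q.1 = true
instance (graph : List (String × List (String × Int))) : Decidable (Pre_getGraphDistances graph) := by
  unfold Pre_getGraphDistances; infer_instance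

def pvWitness_getGraphDistances : (List (String × List (String × Int))) :=
  [("a", [("b", 3)]), ("b", [("a", 5)])]

def Spec_getGraphDistances (graph : List (String × List (String × Int))) (out : List Int) : Prop := out = getGraphDistances_alt graph
instance (graph : List (String × List (String × Int))) (out : List Int) : Decidable (Spec_getGraphDistances graph out) := by unfold Spec_getGraphDistances; infer_instance

-- ===== CLAIM (what is proved, stated in full; the proofs are below) =====
def Claim_equal_getGraphDistances : Prop := ∀ (graph : List (String × List (String × Int))), Dom_getGraphDistances graph → Pre_getGraphDistances graph → Spec_getGraphDistances graph (getGraphDistances graph)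

-- ===== LEMMAS AND PROOFS =====

theorem permsB_eq (pool : List String) (h : pool ≠ []) :
    permsB pool =
      (List.range pool.length).flatMap
        (fun i => (permsB (pool.eraseIdx i)).map (fun rest => rest ++ [pool.getD i ""])) := by
  rw [permsB]
  simp [List.isEmpty_iff, h]

-- the loop invariant of A's permute: iteration i appends the permutations of the pool minus
-- index i, each extended on the right by pool[i] and then by memo
theorem permuteLoop_spec (fuel : Nat) :
    ∀ (array memo : List String) (results : List (List String)), array.length ≤ fuel →
      permuteLoop fuel array memo results =
        results ++
          (List.range array.length).flatMap
            (fun j =>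
              (permsB (array.eraseIdx j)).map
                (fun rest => rest ++ ([array.getD j ""] ++ memo))) := by
  induction fuel with
  | zero =>
    intro array memo results h
    have h0 : array.length = 0 := Nat.le_zero.mp h
    rw [permuteLoop]
    simp [h0]
  | succ fuel ih =>
    intro array memo results h
    rw [permuteLoop]
    have hcong : ∀ (res : List (List String)), ∀ j ∈ List.range array.length,
        (fun res i =>
          let current := [array.getD i ""]
          let rest := array.eraseIdx i
          let res := if rest.length = 0 then res ++ [current ++ memo] else res
          permuteLoop fuel rest (current ++ memo) res) res j =
          res ++ (permsB (array.eraseIdx j)).map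
            (fun rest => rest ++ ([array.getD j ""] ++ memo)) := by
      intro res j hj
      simp only
      have hjl : j < array.length := List.mem_range.mp hj
      have hlen : (array.eraseIdx j).length = array.length - 1 :=
        List.length_eraseIdx_of_lt hjl
      rw [ih _ _ _ (by omega)]
      by_cases h0 : (array.eraseIdx j).length = 0
      · have hrest : array.eraseIdx j = [] := List.eq_nil_of_length_eq_zero h0
        rw [if_pos h0, hrest]
        simp [permsB]
      · have hrest : array.eraseIdx j ≠ [] := fun hh => h0 (by simp [hh])
        rw [if_neg h0]
        rw [List.append_right_inj]
        rw [permsB_eq _ hrest]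
        simp [List.map_flatMap, List.map_map, Function.comp_def, List.append_assoc]
    rw [PySem.List.foldl_congr_mem _ _ _ _ hcong, PySem.List.foldl_append_eq_flatMap]

-- getPermutations(list(graph)) produces exactly B's permutation list (nonempty pool)
theorem permuteLoop_eq_permsB (array : List String) (h : array ≠ []) :
    permuteLoop array.length array [] [] = permsB array := by
  rw [permuteLoop_spec _ _ _ _ le_rfl, permsB_eq array h]
  simp

-- per-permutation distance: A's indexed fold equals B's zip-map sum
theorem dist_eq (w : String → String → Int) (p : List String) :
    (PySem.List.pyRange 0 ((p.length : Int) - 1) 1).foldl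
        (fun d i => d + w (PySem.List.pyGetD p i "") (PySem.List.pyGetD p (i + 1) "")) 0 =
      ((p.zip (p.drop 1)).map (fun ab => w ab.1 ab.2)).sum := by
  rcases p with _ | ⟨x, q⟩
  · simp [PySem.List.pyRange]
  · have h1 : ((x :: q).length : Int) - 1 = (q.length : Nat) := by
      simp
    rw [h1, PySem.List.pyRange_zero_natCast, List.foldl_map, PySem.List.foldl_add]
    rw [zero_add]
    congr 1
    apply List.ext_getElem
    · simp
    · intro k hk1 hk2
      simp only [List.length_map, List.length_range] at hk1
      have hcast : ((k : Int) + 1) = ((k + 1 : Nat) : Int) := by push_cast; ring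
      rw [List.getElem_map, List.getElem_map, List.getElem_range, List.getElem_zip, hcast]
      rw [PySem.List.pyGetD_natCast, PySem.List.pyGetD_natCast]
      simp only [List.getElem_drop]
      rw [List.getD_eq_getElem _ _ (by simpa using Nat.lt_succ_of_lt hk1),
          List.getD_eq_getElem _ _ (by simpa using Nat.succ_lt_succ hk1)]
      have : 1 + k = k + 1 := Nat.add_comm 1 k
      simp [this]

-- ===== VERDICT (by name: the statement is the Claim_ definition above) =====
theorem getGraphDistances_spec : Claim_equal_getGraphDistances := by
  intro graph _hdom _hpre
  unfold Spec_getGraphDistances getGraphDistances getGraphDistances_alt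
  dsimp only
  rcases eq_or_ne (graph.map Prod.fst) [] with h | h
  · rw [h]
    rw [show permuteLoop ([] : List String).length [] [] [] = [] from rfl]
    simp
  · rw [permuteLoop_eq_permsB _ h]
    rw [if_neg (by simpa [List.isEmpty_iff] using h)]
    rw [PySem.List.foldl_append_singleton_eq_map]
    simp only [List.nil_append]
    exact List.map_congr_left (fun p _ => dist_eq (pvWeight graph) p)
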